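-- pv_equiv track=rewrite | github.com/mrigankpawagi/ProbeableProblems | code/q1/buggy/3_1.py | least_positive_index
-- ===== SOURCE A (Python) =====
-- def least_positive_index(numbers):
--     """
--     Finds the index of the least positive integer in a list.
--
--     Args:
--         numbers: A list of numbers.
--
--     Returns:
--         The index of the least positive integer in the list, or -1 if no positive numbers are found.
--     """
--
--     min_index = -1
--     min_value = float('inf')  # Initialize with positive infinity
--     for i, num in enumerate(numbers):
--         if num > 0 and num < min_value:
--             min_value = num
--             min_index = i
--     return min_index
-- ===== SOURCE B (Python) =====
-- def least_positive_index(numbers):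
--     positives = [x for x in numbers if x > 0]
--     if not positives:
--         return -1
--     return numbers.index(min(positives))
-- ===== Notes on version B (the rewrite author's own statement) =====
-- stated objective: simpler
-- what changed: Replaces A's single interleaved scan tracking min_value/min_index against a float('inf') sentinel with three plain passes: filter the positives, take their min, and locate that value with list.index.
import Mathlib
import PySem

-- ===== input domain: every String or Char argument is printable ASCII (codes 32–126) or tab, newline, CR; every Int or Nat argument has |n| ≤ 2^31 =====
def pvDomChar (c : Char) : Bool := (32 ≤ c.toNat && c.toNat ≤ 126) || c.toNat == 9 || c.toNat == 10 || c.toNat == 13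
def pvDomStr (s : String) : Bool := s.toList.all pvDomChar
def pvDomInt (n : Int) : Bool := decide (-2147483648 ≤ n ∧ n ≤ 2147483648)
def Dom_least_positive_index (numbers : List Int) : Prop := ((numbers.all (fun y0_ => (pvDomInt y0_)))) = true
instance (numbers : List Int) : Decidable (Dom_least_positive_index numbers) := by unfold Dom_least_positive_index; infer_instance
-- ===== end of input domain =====

-- B replaces A's single interleaved min-tracking scan with three plain passes (filter positives, min, index); objective: simpler.
-- ===== PORT A =====
-- A: one scan over enumerate(numbers), state (min_index, min_value); min_value = none plays float('inf')
def least_positive_index (numbers : List Int) : Int :=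
  (((PySem.List.enumerate numbers 0).foldl
      (fun (st : Int × Option Int) (p : Int × Int) =>
        if decide (0 < p.2) && st.2.all (fun v => decide (p.2 < v)) then
          (p.1, some p.2)
        else st)
      (-1, none))).1

-- ===== PORT B =====
-- B: filter positives, take their min, locate it with index (the min is in the list, so index? is some; 0 is unreachable)
def least_positive_index_alt (numbers : List Int) : Int :=
  let positives := numbers.filter (fun x => decide (0 < x))
  match PySem.List.min? positives (fun y => y) with
  | none => -1
  | some m =>
      match PySem.List.index? numbers m with
      | some k => (k : Int)
      | none => 0

-- ===== PRECONDITION & SPEC =====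
def Spec_least_positive_index (numbers : List Int) (out : Int) : Prop := out = least_positive_index_alt numbers
instance (numbers : List Int) (out : Int) : Decidable (Spec_least_positive_index numbers out) := by unfold Spec_least_positive_index; infer_instance

-- ===== CLAIM (what is proved, stated in full; the proofs are below) =====
def Claim_equal_least_positive_index : Prop := ∀ (numbers : List Int), Dom_least_positive_index numbers → Spec_least_positive_index numbers (least_positive_index numbers)

-- ===== LEMMAS AND PROOFS =====

-- ===== VERDICT (by name: the statement is the Claim_ definition above) =====
-- A's loop step
def pvStep (st : Int × Option Int) (p : Int × Int) : Int × Option Int :=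
  if decide (0 < p.2) && st.2.all (fun v => decide (p.2 < v)) then (p.1, some p.2) else st

lemma pvStep_eq (numbers : List Int) :
    least_positive_index numbers = ((PySem.List.enumerate numbers 0).foldl pvStep (-1, none)).1 := rfl

lemma enumerate_append (xs ys : List Int) (s : Int) :
    PySem.List.enumerate (xs ++ ys) s
      = PySem.List.enumerate xs s ++ PySem.List.enumerate ys (s + xs.length) := by
  induction xs generalizing s with
  | nil => simp [PySem.List.enumerate_nil]
  | cons a t ih =>
      simp [PySem.List.enumerate_cons, ih, List.length_cons]
      ring_nf

-- loop invariant: state = (B's answer so far, min of positives so far)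
lemma pvInvariant (xs : List Int) :
    (PySem.List.enumerate xs 0).foldl pvStep (-1, none)
      = (least_positive_index_alt xs,
         PySem.List.min? (xs.filter (fun x => decide (0 < x))) (fun y => y)) := by
  induction xs using List.reverseRecOn with
  | nil => simp [PySem.List.enumerate_nil, least_positive_index_alt, PySem.List.min?]
  | append_singleton xs x ih =>
    rw [enumerate_append, List.foldl_append, ih]
    simp only [PySem.List.enumerate_cons, PySem.List.enumerate_nil, List.foldl_cons, List.foldl_nil]
    by_cases hx : 0 < x
    · rcases hmin : PySem.List.min? (xs.filter (fun x => decide (0 < x))) (fun y => y) with _ | m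
      · -- no positives yet
        have hfe : xs.filter (fun x => decide (0 < x)) = [] :=
          (PySem.List.min?_eq_none_iff _ _).mp hmin
        have hnx : x ∉ xs := by
          intro hmem
          have : x ∈ xs.filter (fun x => decide (0 < x)) := by
            simp [List.mem_filter, hmem, hx]
          simp [hfe] at this
        have hidx : PySem.List.index? (xs ++ [x]) x = some xs.length :=
          PySem.List.index?_append_singleton_self xs x hnx
        rw [PySem.List.index?_eq_idxOf?] at hidx
        simp [pvStep, hx, least_positive_index_alt, List.filter_append, hfe,
          PySem.List.min?_id_cons, hidx]
      · -- already have a min m of the positives of xs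
        have hmem : m ∈ xs.filter (fun x => decide (0 < x)) := PySem.List.min?_mem hmin
        have hmxs : m ∈ xs := (List.mem_filter.mp hmem).1
        have hmpos : 0 < m := by
          have := (List.mem_filter.mp hmem).2; simpa using this
        have hmin' : ∀ y ∈ xs.filter (fun x => decide (0 < x)), m ≤ y :=
          fun y hy => PySem.List.min?_isMin hmin y hy
        -- shape of the filtered list and its running min
        obtain ⟨h, t, hft⟩ : ∃ h t, xs.filter (fun x => decide (0 < x)) = h :: t := by
          cases hc : xs.filter (fun x => decide (0 < x)) with
          | nil => rw [hc] at hmin; simp [PySem.List.min?] at hmin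
          | cons h t => exact ⟨h, t, rfl⟩
        have hfold : t.foldl min h = m := by
          have := hmin
          rw [hft, PySem.List.min?_id_cons] at this
          exact Option.some_inj.mp this
        have hminApp :
            PySem.List.min? (xs.filter (fun x => decide (0 < x)) ++ [x]) (fun y => y)
              = some (min m x) := by
          rw [hft]
          simp [PySem.List.min?_id_cons, List.foldl_append, hfold]
        by_cases hlt : x < m
        · have hnx : x ∉ xs := by
            intro hmem'
            have : m ≤ x := hmin' x (by simp [List.mem_filter, hmem', hx])
            omega
          have hidx : PySem.List.index? (xs ++ [x]) x = some xs.length :=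
            PySem.List.index?_append_singleton_self xs x hnx
          rw [PySem.List.index?_eq_idxOf?] at hidx
          have hmx : min m x = x := by omega
          simp [pvStep, hx, hlt, least_positive_index_alt, hminApp, hmx, hidx]
        · have hmx : min m x = m := by omega
          have hidx : PySem.List.index? (xs ++ [x]) m = PySem.List.index? xs m :=
            PySem.List.index?_append_of_mem [x] hmxs
          rw [PySem.List.index?_eq_idxOf?, PySem.List.index?_eq_idxOf?] at hidx
          simp [pvStep, hx, hlt, least_positive_index_alt, hminApp, hmx, hidx, hmin]
    · -- x not positive: nothing changes
      have hfe : (xs ++ [x]).filter (fun x => decide (0 < x))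
          = xs.filter (fun x => decide (0 < x)) := by
        simp [List.filter_append, hx]
      rcases hmin : PySem.List.min? (xs.filter (fun x => decide (0 < x))) (fun y => y) with _ | m
      · simp [pvStep, hx, least_positive_index_alt, hfe, hmin]
      · have hmxs : m ∈ xs := (List.mem_filter.mp (PySem.List.min?_mem hmin)).1
        have hidx : PySem.List.index? (xs ++ [x]) m = PySem.List.index? xs m :=
          PySem.List.index?_append_of_mem [x] hmxs
        rw [PySem.List.index?_eq_idxOf?, PySem.List.index?_eq_idxOf?] at hidx
        simp [pvStep, hx, least_positive_index_alt, hfe, hmin, hidx]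

-- ===== VERDICT (by name: the statement is the Claim_ definition above) =====
theorem least_positive_index_spec : Claim_equal_least_positive_index := by
  intro numbers _
  show least_positive_index numbers = least_positive_index_alt numbers
  rw [pvStep_eq, pvInvariant]
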